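-- pv_equiv track=rewrite | github.com/mo0ogly/llm_robot_medical | backend/tools/gap4_ablation_generator.py | substitute_hybrid
-- ===== SOURCE A (Python) =====
-- CONFUSABLES = {
--     # lowercase
--     'a': '\u0430',  # CYRILLIC SMALL LETTER A
--     'c': '\u0441',  # CYRILLIC SMALL LETTER ES
--     'e': '\u0435',  # CYRILLIC SMALL LETTER IE
--     'i': '\u0456',  # CYRILLIC SMALL LETTER BYELORUSSIAN-UKRAINIAN I
--     'j': '\u0458',  # CYRILLIC SMALL LETTER JE
--     'o': '\u043e',  # CYRILLIC SMALL LETTER O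
--     'p': '\u0440',  # CYRILLIC SMALL LETTER ER
--     's': '\u0455',  # CYRILLIC SMALL LETTER DZE
--     'x': '\u0445',  # CYRILLIC SMALL LETTER HA
--     'y': '\u0443',  # CYRILLIC SMALL LETTER U
--     # uppercase
--     'A': '\u0410',
--     'B': '\u0412',
--     'C': '\u0421',
--     'E': '\u0415',
--     'H': '\u041d',
--     'I': '\u0406',
--     'J': '\u0408',
--     'K': '\u041a',
--     'M': '\u041c',
--     'O': '\u041e',
--     'P': '\u0420',
--     'S': '\u0405',
--     'T': '\u0422',
--     'X': '\u0425',
--     'Y': '\u0423',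
-- }
--
-- def substitute_hybrid(text: str) -> str:
--     """Substitute every 2nd substitutable Latin letter (legacy hybrid style)."""
--     result = []
--     count = 0
--     for c in text:
--         if c in CONFUSABLES:
--             if count % 2 == 0:
--                 result.append(CONFUSABLES[c])
--             else:
--                 result.append(c)
--             count += 1
--         else:
--             result.append(c)
--     return ''.join(result)
-- ===== SOURCE B (Python) =====
-- _LAT = 'aceijopsxyABCEHIJKMOPSTXY'
-- _CYR = ('\u0430\u0441\u0435\u0456\u0458\u043e\u0440\u0455\u0445\u0443'
--         '\u0410\u0412\u0421\u0415\u041d\u0406\u0408\u041a\u041c\u041e'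
--         '\u0420\u0405\u0422\u0425\u0423')
--
-- def substitute_hybrid(text: str) -> str:
--     """Substitute every 2nd substitutable Latin letter (two-pass, parallel-string table)."""
--     chars = list(text)
--     positions = [i for i, c in enumerate(chars) if c in _LAT]
--     for i in positions[::2]:
--         chars[i] = _CYR[_LAT.index(chars[i])]
--     return ''.join(chars)
-- ===== Notes on version B (the rewrite author's own statement) =====
-- stated objective: alternative
-- what changed: Replaces the single pass with an inline modular counter and a dict lookup by two passes over a parallel-string table: first collect the indices of all substitutable characters, then substitute in place exactly at every other collected index (positions[::2]) via index lookup in parallel strings.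
import Mathlib
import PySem

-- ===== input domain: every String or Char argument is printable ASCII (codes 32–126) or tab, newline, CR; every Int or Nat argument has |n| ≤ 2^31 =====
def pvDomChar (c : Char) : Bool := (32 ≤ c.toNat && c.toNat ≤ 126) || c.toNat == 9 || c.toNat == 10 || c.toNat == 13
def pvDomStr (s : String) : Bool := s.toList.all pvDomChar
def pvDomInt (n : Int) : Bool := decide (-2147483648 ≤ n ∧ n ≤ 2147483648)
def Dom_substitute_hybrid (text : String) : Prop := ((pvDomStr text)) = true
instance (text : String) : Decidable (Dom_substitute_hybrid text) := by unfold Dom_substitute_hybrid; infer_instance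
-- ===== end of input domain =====

-- B replaces A's one-pass loop (modular counter + dict lookup) by two passes over a
-- parallel-string table: collect the substitutable indices, then substitute at every
-- other one; same cost, different decomposition and data representation.

-- ===== PORT A =====
-- A's module-level dict literal CONFUSABLES
def CONFUSABLES : PySem.Dict Char Char := PySem.Dict.ofList
  [('a', '\u0430'), ('c', '\u0441'), ('e', '\u0435'), ('i', '\u0456'), ('j', '\u0458'),
   ('o', '\u043e'), ('p', '\u0440'), ('s', '\u0455'), ('x', '\u0445'), ('y', '\u0443'),
   ('A', '\u0410'), ('B', '\u0412'), ('C', '\u0421'), ('E', '\u0415'), ('H', '\u041d'),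
   ('I', '\u0406'), ('J', '\u0408'), ('K', '\u041a'), ('M', '\u041c'), ('O', '\u041e'),
   ('P', '\u0420'), ('S', '\u0405'), ('T', '\u0422'), ('X', '\u0425'), ('Y', '\u0423')]

-- A's for-loop over the characters, carrying the counter; appending becomes cons on the
-- recursive result.  CONFUSABLES[c] is guarded by 'c in CONFUSABLES', so getD c c is exact.
def aLoop : List Char → Nat → List Char
  | [], _ => []
  | c :: cs, count =>
      if CONFUSABLES.contains c then
        (if count % 2 == 0 then CONFUSABLES.getD c c else c) :: aLoop cs (count + 1)
      else
        c :: aLoop cs count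

def substitute_hybrid (text : String) : String := String.ofList (aLoop text.toList 0)

-- ===== PORT B =====
-- B's module-level parallel tables _LAT and _CYR (as character lists)
def latChars : List Char := "aceijopsxyABCEHIJKMOPSTXY".toList
def cyrChars : List Char :=
  "\u0430\u0441\u0435\u0456\u0458\u043e\u0440\u0455\u0445\u0443\u0410\u0412\u0421\u0415\u041d\u0406\u0408\u041a\u041c\u041e\u0420\u0405\u0422\u0425\u0423".toList

-- the comprehension '[i for i, c in enumerate(chars) if c in _LAT]'; for a one-character c,
-- Python's 'c in _LAT' is exactly character membership
def positionsOf : Nat → List Char → List Nat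
  | _, [] => []
  | i, c :: cs => if latChars.contains c then i :: positionsOf (i + 1) cs else positionsOf (i + 1) cs

-- hand port of the step-2 slice 'positions[::2]' (start 0, step 2: exact for any list)
def everyOther {α : Type} : List α → List α
  | [] => []
  | [x] => [x]
  | x :: _ :: xs => x :: everyOther xs

-- 'chars[i] = _CYR[_LAT.index(chars[i])]'; every i comes from positionsOf, so every
-- option below is some there (_LAT.index via PySem.List.index?, _CYR[k] via pyGet?)
def setConf (cs : List Char) (i : Nat) : List Char :=
  match cs[i]? with
  | some c =>
      match PySem.List.index? latChars c with
      | some k =>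
          match PySem.List.pyGet? cyrChars (k : Int) with
          | some r => cs.set i r
          | none => cs
      | none => cs
  | none => cs

def substitute_hybrid_alt (text : String) : String :=
  let chars := text.toList
  let positions := positionsOf 0 chars
  String.ofList ((everyOther positions).foldl setConf chars)

-- ===== PRECONDITION & SPEC =====
def Spec_substitute_hybrid (text : String) (out : String) : Prop := out = substitute_hybrid_alt text
instance (text : String) (out : String) : Decidable (Spec_substitute_hybrid text out) := by unfold Spec_substitute_hybrid; infer_instance

-- ===== CLAIM =====
def Claim_equal_substitute_hybrid : Prop := ∀ (text : String), Dom_substitute_hybrid text → Spec_substitute_hybrid text (substitute_hybrid text)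

-- ===== LEMMAS AND PROOFS =====

-- A's membership test and B's agree on every character
theorem lat_lit : latChars =
    ['a', 'c', 'e', 'i', 'j', 'o', 'p', 's', 'x', 'y',
     'A', 'B', 'C', 'E', 'H', 'I', 'J', 'K', 'M', 'O',
     'P', 'S', 'T', 'X', 'Y'] := by decide

theorem keys_eq : CONFUSABLES.keys = latChars := by decide

theorem contains_eq (c : Char) : CONFUSABLES.contains c = latChars.contains c := by
  rw [PySem.Dict.contains_eq_decide_mem_keys, keys_eq, List.contains_eq_mem]

-- on a substitutable head character, B's in-place update at index 0 writes exactly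
-- A's dict value
theorem setConf_head (c : Char) (hc : latChars.contains c = true) (cs : List Char) :
    setConf (c :: cs) 0 = CONFUSABLES.getD c c :: cs := by
  have hmem : c ∈ latChars := by simpa using hc
  rw [lat_lit] at hmem
  fin_cases hmem <;> rfl

-- proof-side split of a list into its even- and odd-indexed entries
mutual
def pvEvens {α : Type} : List α → List α
  | [] => []
  | x :: xs => x :: pvOdds xs
def pvOdds {α : Type} : List α → List α
  | [] => []
  | _ :: xs => pvEvens xs
end

theorem everyOther_eq_evens {α : Type} : ∀ (l : List α), everyOther l = pvEvens l
  | [] => rfl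
  | [x] => rfl
  | x :: y :: xs => by
      simp [everyOther, pvEvens, pvOdds, everyOther_eq_evens xs]

theorem evens_odds_map {α β : Type} (f : α → β) :
    ∀ (l : List α), pvEvens (l.map f) = (pvEvens l).map f ∧ pvOdds (l.map f) = (pvOdds l).map f
  | [] => ⟨rfl, rfl⟩
  | x :: xs => by
      obtain ⟨h1, h2⟩ := evens_odds_map f xs
      exact ⟨by simp [pvEvens, h2], by simp [pvOdds, h1]⟩

theorem pos_succ : ∀ (cs : List Char) (i : Nat),
    positionsOf (i + 1) cs = (positionsOf i cs).map (· + 1)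
  | [], _ => rfl
  | c :: cs, i => by
      simp only [positionsOf]
      by_cases h : c ∈ latChars <;> simp [h, pos_succ cs (i + 1)]

theorem foldl_shift : ∀ (Q : List Nat) (d : Char) (cs : List Char),
    (Q.map (· + 1)).foldl setConf (d :: cs) = d :: Q.foldl setConf cs
  | [], _, _ => rfl
  | i :: Q, d, cs => by
      have hset : setConf (d :: cs) (i + 1) = d :: setConf cs i := by
        unfold setConf
        simp only [List.getElem?_cons_succ]
        cases h : cs[i]? with
        | none => simp [h]
        | some c =>
            simp only [h]
            cases hk : PySem.List.index? latChars c with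
            | none => simp [hk]
            | some k =>
                simp only [hk]
                cases hr : PySem.List.pyGet? cyrChars (k : Int) with
                | none => simp [hr]
                | some r => simp [hr, List.set_cons_succ]
      simp only [List.map_cons, List.foldl_cons, hset]
      exact foldl_shift Q d (setConf cs i)

theorem main_lemma : ∀ (cs : List Char) (n : Nat),
    aLoop cs n =
      (if n % 2 == 0 then pvEvens (positionsOf 0 cs) else pvOdds (positionsOf 0 cs)).foldl setConf cs
  | [], n => by cases h : (n % 2 == 0) <;> simp [aLoop, positionsOf, pvEvens, pvOdds]
  | c :: cs, n => by
      have hpos : positionsOf 1 cs = (positionsOf 0 cs).map (· + 1) := pos_succ cs 0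
      have ih := main_lemma cs (n + 1)
      have ih0 := main_lemma cs n
      by_cases hc : latChars.contains c = true
      · have hm : c ∈ latChars := by simpa using hc
        by_cases hn : n % 2 = 0
        · have hn2 : (n + 1) % 2 ≠ 0 := by omega
          simp only [aLoop, positionsOf, contains_eq, hc, if_pos, hpos]
          simp only [beq_iff_eq, hn, if_true]
          rw [show pvEvens (0 :: (positionsOf 0 cs).map (· + 1)) =
                0 :: pvOdds ((positionsOf 0 cs).map (· + 1)) from rfl]
          rw [(evens_odds_map (· + 1) (positionsOf 0 cs)).2]
          simp only [List.foldl_cons, setConf_head c hc, foldl_shift]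
          rw [ih]
          simp [hn2]
        · have hn2 : (n + 1) % 2 = 0 := by omega
          simp only [aLoop, positionsOf, contains_eq, hc, if_pos, hpos]
          simp only [beq_iff_eq, hn, if_false]
          rw [show pvOdds (0 :: (positionsOf 0 cs).map (· + 1)) =
                pvEvens ((positionsOf 0 cs).map (· + 1)) from rfl]
          rw [(evens_odds_map (· + 1) (positionsOf 0 cs)).1]
          rw [foldl_shift]
          rw [ih]
          simp [hn2]
      · have hm : c ∉ latChars := by
          intro hmm; exact hc (by simpa using hmm)
        by_cases hn : n % 2 = 0
        · have ih0' : aLoop cs n = List.foldl setConf cs (pvEvens (positionsOf 0 cs)) := by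
            simpa [hn] using ih0
          simp [aLoop, positionsOf, contains_eq, hm, hpos, hn,
            (evens_odds_map (· + 1) (positionsOf 0 cs)).1, foldl_shift, ih0']
        · have ih0' : aLoop cs n = List.foldl setConf cs (pvOdds (positionsOf 0 cs)) := by
            simpa [hn] using ih0
          simp [aLoop, positionsOf, contains_eq, hm, hpos, hn,
            (evens_odds_map (· + 1) (positionsOf 0 cs)).2, foldl_shift, ih0']

-- ===== VERDICT =====
theorem substitute_hybrid_spec : Claim_equal_substitute_hybrid := by
  intro text _
  show substitute_hybrid text = substitute_hybrid_alt text
  have h := main_lemma text.toList 0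
  norm_num at h
  show String.ofList (aLoop text.toList 0) =
      String.ofList (List.foldl setConf text.toList (everyOther (positionsOf 0 text.toList)))
  rw [h, everyOther_eq_evens]
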